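-- pv_equiv track=rewrite | github.com/Azayan03/Bin-Packing-solver | genetic.py | shift_pipes
-- ===== SOURCE A (Python) =====
-- def shift_pipes(chromosome):
--     # add distinct bins to a set
--     distinct_bins = set()
--     for item in chromosome:
--         distinct_bins.add(item[1])
--
--     # transfer it to a list and then sort it
--     list_of_set = list(distinct_bins)
--     list_of_set.sort()
--
--     # map every index to the lowest available index
--     idx = 0
--     my_map = {}
--     for item in list_of_set:
--         my_map[item] = idx
--         idx += 1
--     new_chromosome = []
--
--     # make the chromosome empty and then insert the new shifted list to your chromosome again
--     for i in range(len(chromosome)):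
--         new_chromosome.append((chromosome[i][0], my_map[chromosome[i][1]]))
--
--     return new_chromosome
-- ===== SOURCE B (Python) =====
-- def shift_pipes(chromosome):
--     # rank of a bin label = number of distinct smaller bin labels; no sort, no index map
--     bins = [b for _, b in chromosome]
--     return [(g, len({u for u in bins if u < b})) for g, b in chromosome]
-- ===== Notes on version B (the rewrite author's own statement) =====
-- stated objective: alternative
-- what changed: Replaces A's distinct-set + sort + value-to-index dict + rewrite loop with a single comprehension that computes each bin's rank directly as the number of distinct smaller bin labels (no sorting, no map).
import Mathlib
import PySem

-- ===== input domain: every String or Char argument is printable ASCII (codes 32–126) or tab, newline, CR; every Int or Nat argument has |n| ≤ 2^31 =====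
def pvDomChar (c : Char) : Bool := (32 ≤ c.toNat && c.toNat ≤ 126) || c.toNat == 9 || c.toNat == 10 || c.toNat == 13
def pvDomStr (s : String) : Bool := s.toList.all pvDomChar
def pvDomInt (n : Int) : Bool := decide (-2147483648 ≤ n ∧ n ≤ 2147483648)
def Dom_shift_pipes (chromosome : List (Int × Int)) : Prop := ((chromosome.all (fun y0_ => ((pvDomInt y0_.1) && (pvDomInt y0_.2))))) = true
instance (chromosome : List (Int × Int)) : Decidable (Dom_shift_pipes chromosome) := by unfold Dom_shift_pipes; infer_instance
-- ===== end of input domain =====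

-- B relabels each bin directly as the count of distinct smaller bin labels (no sort, no map);
-- same values as A, genuinely different structure, no speed claim.

-- ===== PORT A =====
-- my_map[chromosome[i][1]] can never raise KeyError (every bin was inserted), and
-- chromosome[i] with i ∈ range(len(chromosome)) can never raise IndexError, so
-- Dict.getD / pyGetD are exact here.
def shift_pipes (chromosome : List (Int × Int)) : List (Int × Int) :=
  let distinct_bins : PySem.Set Int :=
    chromosome.foldl (fun s item => PySem.Set.add s item.2) PySem.Set.empty
  let list_of_set := PySem.List.sorted distinct_bins (fun x => x) false
  let my_map :=
    (list_of_set.foldl (fun (st : PySem.Dict Int Int × Int) item =>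
      (st.1.insert item st.2, st.2 + 1)) (PySem.Dict.empty, 0)).1
  (PySem.List.pyRange 0 (PySem.List.len chromosome) 1).foldl
    (fun acc i =>
      acc ++ [((PySem.List.pyGetD chromosome i (0, 0)).1,
               my_map.getD (PySem.List.pyGetD chromosome i (0, 0)).2 0)])
    []

-- ===== PORT B =====
def shift_pipes_alt (chromosome : List (Int × Int)) : List (Int × Int) :=
  let bins := chromosome.map (fun p => p.2)
  chromosome.map (fun p =>
    (p.1, PySem.Set.len (PySem.Set.ofList (bins.filter (fun u => u < p.2)))))

-- ===== PRECONDITION & SPEC =====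
def Spec_shift_pipes (chromosome : List (Int × Int)) (out : List (Int × Int)) : Prop := out = shift_pipes_alt chromosome
instance (chromosome : List (Int × Int)) (out : List (Int × Int)) : Decidable (Spec_shift_pipes chromosome out) := by unfold Spec_shift_pipes; infer_instance

-- ===== CLAIM (what is proved, stated in full; the proofs are below) =====
def Claim_equal_shift_pipes : Prop := ∀ (chromosome : List (Int × Int)), Dom_shift_pipes chromosome → Spec_shift_pipes chromosome (shift_pipes chromosome)

-- ===== LEMMAS AND PROOFS =====

-- A's set-building loop over pairs is Set.ofList of the bins.
lemma foldl_add_snd (xs : List (Int × Int)) (s : PySem.Set Int) :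
    xs.foldl (fun s item => PySem.Set.add s item.2) s
      = (xs.map (fun p => p.2)).foldl PySem.Set.add s := by
  induction xs generalizing s with
  | nil => rfl
  | cons x t ih => simp [List.foldl, ih]

-- Keys not in the fold's list are untouched.
lemma getD_rankfold_not_mem (L : List Int) (v : Int) (hv : v ∉ L)
    (d : PySem.Dict Int Int) (i0 : Int) :
    ((L.foldl (fun (st : PySem.Dict Int Int × Int) item =>
        (st.1.insert item st.2, st.2 + 1)) (d, i0)).1).getD v 0 = d.getD v 0 := by
  induction L generalizing d i0 with
  | nil => rfl
  | cons x t ih =>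
      simp only [List.mem_cons, not_or] at hv
      simp only [List.foldl]
      rw [ih hv.2, PySem.Dict.getD_insert_of_ne (hne := hv.1)]

-- The value→index map built by A's loop: getD v = start index + position of v in L.
lemma getD_rankfold (L : List Int) (hL : L.Nodup) (v : Int) (hv : v ∈ L)
    (d : PySem.Dict Int Int) (i0 : Int) :
    ((L.foldl (fun (st : PySem.Dict Int Int × Int) item =>
        (st.1.insert item st.2, st.2 + 1)) (d, i0)).1).getD v 0
      = i0 + (L.idxOf v : Int) := by
  induction L generalizing d i0 with
  | nil => cases hv
  | cons x t ih =>
      simp only [List.foldl]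
      rcases List.mem_cons.mp hv with h | h
      · subst h
        have hvt : v ∉ t := (List.nodup_cons.mp hL).1
        rw [getD_rankfold_not_mem t v hvt, PySem.Dict.getD_insert_self]
        simp
      · have hne : v ≠ x := by
          rintro rfl; exact (List.nodup_cons.mp hL).1 h
        rw [ih (List.nodup_cons.mp hL).2 h]
        have hbeq : (x == v) = false := by simpa using Ne.symm hne
        have : (x :: t).idxOf v = t.idxOf v + 1 := by
          simp [List.idxOf_cons, hbeq]
        rw [this]
        push_cast
        ring

-- In a strictly increasing list, a member's position is the count of smaller elements.
lemma idxOf_eq_countP_lt (L : List Int) (hL : L.Pairwise (· < ·)) (v : Int) (hv : v ∈ L) :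
    L.idxOf v = L.countP (fun u => decide (u < v)) := by
  induction L with
  | nil => cases hv
  | cons x t ih =>
      have hall : ∀ y ∈ t, x < y := (List.pairwise_cons.mp hL).1
      have ht : t.Pairwise (· < ·) := (List.pairwise_cons.mp hL).2
      rcases List.mem_cons.mp hv with h | h
      · subst h
        have : t.countP (fun u => decide (u < v)) = 0 := by
          apply List.countP_eq_zero.mpr
          intro u hu
          simp [not_lt.mpr (le_of_lt (hall u hu))]
        simp [this]
      · have hne : v ≠ x := by
          rintro rfl; exact lt_irrefl v (hall v h)
        have hxv : x < v := hall v h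
        have hbeq : (x == v) = false := by simpa using Ne.symm hne
        simp [List.idxOf_cons, hbeq, hxv, ih ht h, Nat.add_comm]

-- Counting distinct elements `< v` equals the size of the set of the filtered list.
lemma countP_ofList_eq_len_filter (bins : List Int) (v : Int) :
    (PySem.Set.ofList bins : List Int).countP (fun u => decide (u < v))
      = (PySem.Set.ofList (bins.filter (fun u => u < v)) : List Int).length := by
  rw [List.countP_eq_length_filter]
  apply List.Perm.length_eq
  apply (List.perm_ext_iff_of_nodup
      ((PySem.Set.nodup_ofList bins).filter _) (PySem.Set.nodup_ofList _)).mpr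
  intro a
  simp [List.mem_filter, PySem.Set.mem_ofList]

-- The back-to-front append fold is map.
lemma foldl_append_map (xs : List (Int × Int)) (g : Int × Int → Int × Int)
    (acc : List (Int × Int)) :
    xs.foldl (fun a x => a ++ [g x]) acc = acc ++ xs.map g := by
  induction xs generalizing acc with
  | nil => simp
  | cons x t ih => simp [List.foldl, ih]

-- ===== VERDICT (by name: the statement is the Claim_ definition above) =====
theorem shift_pipes_spec : Claim_equal_shift_pipes := by
  intro chromosome _
  unfold Spec_shift_pipes shift_pipes shift_pipes_alt
  set bins := chromosome.map (fun p => p.2) with hbins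
  set S : PySem.Set Int := PySem.Set.ofList bins with hS
  have hset : chromosome.foldl (fun s item => PySem.Set.add s item.2) PySem.Set.empty = S := by
    rw [foldl_add_snd]
    rfl
  rw [hset]
  set L := PySem.List.sorted S (fun x => x) false with hLdef
  have hLpair : L.Pairwise (· < ·) := PySem.List.sorted_ofList_pairwise_lt bins
  have hLnodup : L.Nodup := hLpair.imp (fun h => ne_of_lt h)
  -- turn the range-indexed loop into a fold over the list, then into a map
  rw [PySem.List.foldl_pyRange_zero_pyGetD chromosome (0, 0)
        (fun acc x => acc ++ [(x.1,
          ((L.foldl (fun (st : PySem.Dict Int Int × Int) item =>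
              (st.1.insert item st.2, st.2 + 1)) (PySem.Dict.empty, 0)).1).getD x.2 0)]) []]
  rw [foldl_append_map]
  simp only [List.nil_append]
  apply List.map_congr_left
  intro p hp
  have hmem : p.2 ∈ L := by
    rw [hLdef, PySem.List.mem_sorted, hS, PySem.Set.mem_ofList, hbins]
    exact List.mem_map.mpr ⟨p, hp, rfl⟩
  rw [getD_rankfold L hLnodup p.2 hmem PySem.Dict.empty 0]
  rw [idxOf_eq_countP_lt L hLpair p.2 hmem]
  have hperm : L.Perm S := PySem.List.sorted_perm S (fun x => x) false
  rw [hperm.countP_eq]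
  rw [hS, countP_ofList_eq_len_filter bins p.2]
  simp [PySem.Set.len]
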